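-- pv_equiv track=rewrite | github.com/wfang11/224N | beavertail_eval.py | parse_gpt
-- ===== SOURCE A (Python) =====
-- letters = ['A', 'B', 'C', 'D', 'E', 'F', 'G', 'H', 'I']
--
-- def parse_gpt(answer):
--     try:
--         if answer in ["1", "2"]:
--             return str(int(answer) - 1)
--         if answer in letters:
--             index_map = {letter: str(index) for index, letter in enumerate(letters)}
--             answer = index_map[answer]
--             return answer
--     except:
--         return "-1"
--     return "-1"
-- ===== SOURCE B (Python) =====
-- def parse_gpt(answer):
--     try:
--         if len(answer) == 1:
--             if answer in "12":
--                 return str(ord(answer) - ord("1"))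
--             if answer in "ABCDEFGHI":
--                 return str(ord(answer) - ord("A"))
--     except TypeError:
--         return "-1"
--     return "-1"
-- ===== Notes on version B (the rewrite author's own statement) =====
-- stated objective: simpler
-- what changed: B drops the list membership tests and the per-call dict lookup table entirely and computes the index by character-code arithmetic (subtracting the code of the base character) after a length-one and range check.
import Mathlib
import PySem

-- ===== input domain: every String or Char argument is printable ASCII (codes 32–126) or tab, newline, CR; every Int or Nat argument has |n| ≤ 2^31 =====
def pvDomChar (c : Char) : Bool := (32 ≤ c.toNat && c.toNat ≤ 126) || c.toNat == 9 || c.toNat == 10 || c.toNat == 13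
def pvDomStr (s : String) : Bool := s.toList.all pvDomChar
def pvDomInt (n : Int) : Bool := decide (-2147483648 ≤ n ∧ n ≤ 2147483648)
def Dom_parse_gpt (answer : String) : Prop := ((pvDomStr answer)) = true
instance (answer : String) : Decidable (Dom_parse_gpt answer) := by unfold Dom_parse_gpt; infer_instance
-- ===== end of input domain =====

-- B replaces A's per-call dict/lookup table with closed-form character arithmetic (ord-based index); objective: simpler.


-- ===== PORT A =====
def pyLetters : List String := ["A", "B", "C", "D", "E", "F", "G", "H", "I"]

def parse_gpt (answer : String) : String :=
  if answer ∈ ["1", "2"] then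
    -- str(int(answer) - 1); int() cannot raise here since answer is "1" or "2",
    -- the none branch is the enclosing except returning "-1"
    match PySem.Int.ofStr? answer with
    | some n => PySem.Int.toStr (n - 1)
    | none => "-1"
  else if answer ∈ pyLetters then
    let index_map : PySem.Dict String String :=
      (PySem.List.enumerate pyLetters).foldl
        (fun d p => d.insert p.2 (PySem.Int.toStr p.1)) PySem.Dict.empty
    -- index_map[answer]; a KeyError would be the except branch returning "-1"
    match index_map.get? answer with
    | some s => s
    | none => "-1"
  else "-1"

-- ===== PORT B =====
def parse_gpt_alt (answer : String) : String :=
  match answer.toList with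
  | [c] =>
    if c ∈ "12".toList then PySem.Int.toStr ((c.toNat : Int) - 49)
    else if c ∈ "ABCDEFGHI".toList then PySem.Int.toStr ((c.toNat : Int) - 65)
    else "-1"
  | _ => "-1"

-- ===== PRECONDITION & SPEC =====
def Spec_parse_gpt (answer : String) (out : String) : Prop := out = parse_gpt_alt answer
instance (answer : String) (out : String) : Decidable (Spec_parse_gpt answer out) := by unfold Spec_parse_gpt; infer_instance

-- ===== CLAIM (what is proved, stated in full; the proofs are below) =====
def Claim_equal_parse_gpt : Prop := ∀ (answer : String), Dom_parse_gpt answer → Spec_parse_gpt answer (parse_gpt answer)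

-- ===== LEMMAS AND PROOFS =====

-- String equality with a one-char literal, seen through toList
lemma eq_iff_toList (a b : String) : a = b ↔ a.toList = b.toList := by
  constructor
  · intro h; rw [h]
  · intro h; exact String.toList_inj.mp h

-- ===== VERDICT (by name: the statement is the Claim_ definition above) =====
theorem parse_gpt_spec : Claim_equal_parse_gpt := by
  intro answer _
  unfold Spec_parse_gpt parse_gpt parse_gpt_alt
  have h1 := eq_iff_toList answer "1"
  have h2 := eq_iff_toList answer "2"
  have hA := eq_iff_toList answer "A"
  have hB := eq_iff_toList answer "B"
  have hC := eq_iff_toList answer "C"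
  have hD := eq_iff_toList answer "D"
  have hE := eq_iff_toList answer "E"
  have hF := eq_iff_toList answer "F"
  have hG := eq_iff_toList answer "G"
  have hH := eq_iff_toList answer "H"
  have hI := eq_iff_toList answer "I"
  match hl : answer.toList with
  | [] =>
    simp [hl] at h1 h2 hA hB hC hD hE hF hG hH hI
    simp [pyLetters, h1, h2, hA, hB, hC, hD, hE, hF, hG, hH, hI]
  | [c] =>
    simp only [hl] at h1 h2 hA hB hC hD hE hF hG hH hI
    by_cases e1 : c = '1'
    · subst e1
      have : answer = "1" := h1.mpr (by decide)
      subst this; decide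
    by_cases e2 : c = '2'
    · subst e2
      have : answer = "2" := h2.mpr (by decide)
      subst this; decide
    by_cases eA : c = 'A'
    · subst eA; have : answer = "A" := hA.mpr (by decide); subst this; decide
    by_cases eB : c = 'B'
    · subst eB; have : answer = "B" := hB.mpr (by decide); subst this; decide
    by_cases eC : c = 'C'
    · subst eC; have : answer = "C" := hC.mpr (by decide); subst this; decide
    by_cases eD : c = 'D'
    · subst eD; have : answer = "D" := hD.mpr (by decide); subst this; decide
    by_cases eE : c = 'E'
    · subst eE; have : answer = "E" := hE.mpr (by decide); subst this; decide
    by_cases eF : c = 'F'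
    · subst eF; have : answer = "F" := hF.mpr (by decide); subst this; decide
    by_cases eG : c = 'G'
    · subst eG; have : answer = "G" := hG.mpr (by decide); subst this; decide
    by_cases eH : c = 'H'
    · subst eH; have : answer = "H" := hH.mpr (by decide); subst this; decide
    by_cases eI : c = 'I'
    · subst eI; have : answer = "I" := hI.mpr (by decide); subst this; decide
    -- c is none of the relevant characters: both sides return "-1"
    have n1 : answer ≠ "1" := fun h => e1 (by simpa using h1.mp h)
    have n2 : answer ≠ "2" := fun h => e2 (by simpa using h2.mp h)
    have nA : answer ≠ "A" := fun h => eA (by simpa using hA.mp h)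
    have nB : answer ≠ "B" := fun h => eB (by simpa using hB.mp h)
    have nC : answer ≠ "C" := fun h => eC (by simpa using hC.mp h)
    have nD : answer ≠ "D" := fun h => eD (by simpa using hD.mp h)
    have nE : answer ≠ "E" := fun h => eE (by simpa using hE.mp h)
    have nF : answer ≠ "F" := fun h => eF (by simpa using hF.mp h)
    have nG : answer ≠ "G" := fun h => eG (by simpa using hG.mp h)
    have nH : answer ≠ "H" := fun h => eH (by simpa using hH.mp h)
    have nI : answer ≠ "I" := fun h => eI (by simpa using hI.mp h)
    simp [pyLetters, n1, n2, nA, nB, nC, nD, nE, nF, nG, nH, nI,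
      e1, e2, eA, eB, eC, eD, eE, eF, eG, eH, eI]
  | c1 :: c2 :: rest =>
    simp [hl] at h1 h2 hA hB hC hD hE hF hG hH hI
    simp [pyLetters, h1, h2, hA, hB, hC, hD, hE, hF, hG, hH, hI]
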